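-- pv_equiv track=rewrite | github.com/liskos/jakov | ege05/281.py | f
-- ===== SOURCE A (Python) =====
-- def f(n):
--     s1 = 0
--     s2 = 0
--     for digit in str(n):
--         if int(digit) % 2 == 0:
--             s1 += int(digit)
--     s2 = sum(map(int,str(n)[1::2]))
--     return abs(s1 - s2)
-- ===== SOURCE B (Python) =====
-- def f(n):
--     s1 = 0
--     s2 = 0
--     for i, digit in enumerate(str(n)):
--         d = int(digit)
--         if d % 2 == 0:
--             s1 += d
--         if i % 2 == 1:
--             s2 += d
--     return abs(s1 - s2)
-- ===== Notes on version B (the rewrite author's own statement) =====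
-- stated objective: simpler
-- what changed: A loops once to sum even digits and then makes a second pass via the slice str(n)[1::2] for the odd-position sum; B computes both sums in a single enumerate pass with two accumulators.
import Mathlib
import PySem

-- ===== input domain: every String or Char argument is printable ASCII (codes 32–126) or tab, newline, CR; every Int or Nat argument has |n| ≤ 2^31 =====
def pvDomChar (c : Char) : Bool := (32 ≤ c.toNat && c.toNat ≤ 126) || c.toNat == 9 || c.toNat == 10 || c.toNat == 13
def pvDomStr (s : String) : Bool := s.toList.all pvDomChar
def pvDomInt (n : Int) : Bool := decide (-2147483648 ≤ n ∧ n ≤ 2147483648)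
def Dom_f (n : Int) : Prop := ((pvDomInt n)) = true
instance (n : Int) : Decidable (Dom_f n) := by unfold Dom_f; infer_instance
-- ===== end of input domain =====

-- B computes both digit sums in one enumerate pass instead of A's loop plus a second slice pass; objective: simpler.

-- int(c) for a single decimal-digit character; exact on digit chars ('0'-'9'),
-- which is all that appears in str(n) under Pre_f (0 ≤ n).
def pyIntDigit (c : Char) : Int := (c.toNat : Int) - 48

-- ===== PORT A =====
def f (n : Int) : Int :=
  let s := PySem.Int.toChars n
  let s1 := s.foldl (fun a c => if pyIntDigit c % 2 == 0 then a + pyIntDigit c else a) 0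
  let s2 := (((PySem.List.slice? s (some 1) none 2).getD []).map pyIntDigit).sum
  |s1 - s2|

-- ===== PORT B =====
def f_alt (n : Int) : Int :=
  let p := (PySem.List.enumerate (PySem.Int.toChars n) 0).foldl
    (fun (acc : Int × Int) (iv : Int × Char) =>
      let d := pyIntDigit iv.2
      ((if d % 2 == 0 then acc.1 + d else acc.1),
       (if iv.1 % 2 == 1 then acc.2 + d else acc.2))) (0, 0)
  |p.1 - p.2|

-- ===== PRECONDITION & SPEC =====
-- Pre_f excludes negative n: there str(n) starts with '-' and Python's int('-') raises ValueError.
def Pre_f (n : Int) : Prop := 0 ≤ n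
instance (n : Int) : Decidable (Pre_f n) := by unfold Pre_f; infer_instance
def pvWitness_f : Int := 123

def Spec_f (n : Int) (out : Int) : Prop := out = f_alt n
instance (n : Int) (out : Int) : Decidable (Spec_f n out) := by unfold Spec_f; infer_instance

-- ===== CLAIM (what is proved, stated in full; the proofs are below) =====
def Claim_equal_f : Prop := ∀ (n : Int), Dom_f n → Pre_f n → Spec_f n (f n)

-- ===== LEMMAS AND PROOFS =====

-- sum of even digits of a char list
def evenSum : List Char → Int
  | [] => 0
  | c :: r => (if pyIntDigit c % 2 == 0 then pyIntDigit c else 0) + evenSum r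

-- sum of digits at positions of odd absolute index, positions counted from i
def oddAux (i : Int) : List Char → Int
  | [] => 0
  | c :: r => (if i % 2 == 1 then pyIntDigit c else 0) + oddAux (i + 1) r

-- elements at odd indices (xs[1::2])
def oddIdx {α : Type} : List α → List α
  | [] => []
  | [_] => []
  | _ :: b :: r => b :: oddIdx r

theorem foldl_evenSum (s : List Char) (a : Int) :
    s.foldl (fun a c => if pyIntDigit c % 2 == 0 then a + pyIntDigit c else a) a
      = a + evenSum s := by
  induction s generalizing a with
  | nil => simp [evenSum]
  | cons c r ih => simp only [List.foldl_cons, evenSum, ih]; split_ifs <;> ring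

theorem oddAux_parity (s : List Char) (i j : Int) (h : i % 2 = j % 2) :
    oddAux i s = oddAux j s := by
  induction s generalizing i j with
  | nil => rfl
  | cons c r ih => simp only [oddAux, h, ih (i+1) (j+1) (by omega)]

theorem foldl_enum (s : List Char) (i : Int) (a b : Int) :
    (PySem.List.enumerate s i).foldl
      (fun (acc : Int × Int) (iv : Int × Char) =>
        ((if pyIntDigit iv.2 % 2 == 0 then acc.1 + pyIntDigit iv.2 else acc.1),
         (if iv.1 % 2 == 1 then acc.2 + pyIntDigit iv.2 else acc.2))) (a, b)
      = (a + evenSum s, b + oddAux i s) := by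
  induction s generalizing i a b with
  | nil => simp [PySem.List.enumerate_nil, evenSum, oddAux]
  | cons c r ih =>
      rw [PySem.List.enumerate_cons, List.foldl_cons, ih]
      simp only [evenSum, oddAux, Prod.mk.injEq]
      constructor <;> split_ifs <;> ring

theorem oddIdx_sum (s : List Char) :
    ((oddIdx s).map pyIntDigit).sum = oddAux 0 s := by
  induction s using oddIdx.induct with
  | case1 => rfl
  | case2 a => simp [oddIdx, oddAux]
  | case3 a b r ih =>
      simp only [oddIdx, List.map_cons, List.sum_cons, oddAux, ih,
        oddAux_parity r (0 + 1 + 1) 0 (by omega)]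
      norm_num

theorem filterMap_range_oddIdx {α : Type} (s : List α) :
    List.filterMap (fun k => s[2*k+1]?) (List.range (s.length / 2)) = oddIdx s := by
  induction s using oddIdx.induct with
  | case1 => simp [oddIdx]
  | case2 a => simp [oddIdx]
  | case3 a b r ih =>
      have hlen : (a :: b :: r).length / 2 = r.length / 2 + 1 := by
        simp [List.length_cons]; omega
      rw [hlen, List.range_succ_eq_map, List.filterMap_cons, List.filterMap_map]
      have h0 : (a :: b :: r)[2*0+1]? = some b := rfl
      have hcong : ∀ k, ((fun k => (a :: b :: r)[2*k+1]?) ∘ (· + 1)) k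
          = (fun k => r[2*k+1]?) k := by
        intro k
        simp only [Function.comp]
        have : 2 * (k + 1) + 1 = (2 * k + 1) + 2 := by omega
        rw [this]
        rfl
      rw [h0, funext hcong, ih]
      simp [oddIdx]

theorem slice_odd {α : Type} (s : List α) :
    PySem.List.slice? s (some 1) none 2 = some (oddIdx s) := by
  cases s with
  | nil => rfl
  | cons a t =>
      unfold PySem.List.slice? PySem.List.sliceIndices
      norm_num
      have hc : (if 0 < t.length then (((t.length : Int) + 2 - 1) / 2).toNat else 0)
          = (a :: t).length / 2 := by
        simp only [List.length_cons]; split_ifs <;> omega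
      rw [hc, ← filterMap_range_oddIdx (a :: t)]
      apply List.filterMap_congr
      intro k _
      have hidx : ((1 : Int) + 2 * (k : Int)).toNat = 2 * k + 1 := by omega
      rw [hidx]

-- ===== VERDICT (by name: the statement is the Claim_ definition above) =====
theorem f_spec : Claim_equal_f := by
  intro n _ _
  unfold Spec_f f f_alt
  simp only [foldl_enum, foldl_evenSum, slice_odd, Option.getD_some, oddIdx_sum]
  norm_num
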